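-- pv_equiv track=rewrite | github.com/CorinaK/DHSIday2 | src/repetitioncounter/count_repetitions.py | count_repetitions
-- ===== SOURCE A (Python) =====
-- def count_repetitions(tokens):
--     occurences = {}
--     current_phrase_start_counter = 0
--     while current_phrase_start_counter < len(tokens):
--         current_phrase_end_counter = current_phrase_start_counter + 1
--         while current_phrase_end_counter < len(tokens) + 1:
--             current_phrase = tokens[current_phrase_start_counter:current_phrase_end_counter]
--             current_phrase_as_a_string = ' '.join(current_phrase)
--             if current_phrase_as_a_string in occurences:
--                 current_phrase_end_counter += 1
--                 continue
--             current_phrase_size = current_phrase_end_counter - current_phrase_start_counter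
--             comparison_phrase_start_counter = current_phrase_end_counter
--             comparison_phrase_end_counter = current_phrase_end_counter + current_phrase_size
--
--             while comparison_phrase_end_counter < len(tokens) + 1:
--                 comparison_phrase = tokens[comparison_phrase_start_counter:comparison_phrase_end_counter]
--                 if comparison_phrase == current_phrase:
--                     if current_phrase_as_a_string in occurences:
--                         occurences[current_phrase_as_a_string] += 1
--                     else:
--                         occurences[current_phrase_as_a_string] = 2
--
--                 comparison_phrase_start_counter += 1
--                 comparison_phrase_end_counter += 1
--
--             current_phrase_end_counter += 1
--
--         current_phrase_start_counter += 1
--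
--     return occurences
-- ===== SOURCE B (Python) =====
-- def count_repetitions(tokens):
--     n = len(tokens)
--     occurences = {}
--     for s in range(n):
--         # match[p] = length of the longest common prefix of tokens[s:] and tokens[p:]
--         match = []
--         for p in range(n):
--             k = 0
--             while s + k < n and p + k < n and tokens[s + k] == tokens[p + k]:
--                 k += 1
--             match.append(k)
--         # bucket[v] = number of later starts p whose usable repeat length is exactly v
--         bucket = [0] * (n + 2)
--         for p in range(s + 1, n):
--             hi = min(match[p], p - s, n - p)
--             if hi > 0:
--                 bucket[hi] += 1
--         # cnts[L] = number of later starts p usable for phrase length L (suffix sums)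
--         cnts = [0] * (n + 2)
--         for L in range(n, 0, -1):
--             cnts[L] = cnts[L + 1] + bucket[L]
--         for L in range(1, n - s + 1):
--             c = cnts[L]
--             if c:
--                 key = ' '.join(tokens[s:s + L])
--                 if key not in occurences:
--                     occurences[key] = c + 1
--     return occurences
-- ===== Notes on version B (the rewrite author's own statement) =====
-- stated objective: faster
-- what changed: B precomputes, per start s, the common-prefix length between the suffix at s and every later suffix, turns them into per-length repetition counts with a bucket array plus suffix sums, and only joins a phrase into its key when it actually repeats, instead of A's re-slicing and re-comparing every candidate window for every (start,end) pair.
import Mathlib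
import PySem

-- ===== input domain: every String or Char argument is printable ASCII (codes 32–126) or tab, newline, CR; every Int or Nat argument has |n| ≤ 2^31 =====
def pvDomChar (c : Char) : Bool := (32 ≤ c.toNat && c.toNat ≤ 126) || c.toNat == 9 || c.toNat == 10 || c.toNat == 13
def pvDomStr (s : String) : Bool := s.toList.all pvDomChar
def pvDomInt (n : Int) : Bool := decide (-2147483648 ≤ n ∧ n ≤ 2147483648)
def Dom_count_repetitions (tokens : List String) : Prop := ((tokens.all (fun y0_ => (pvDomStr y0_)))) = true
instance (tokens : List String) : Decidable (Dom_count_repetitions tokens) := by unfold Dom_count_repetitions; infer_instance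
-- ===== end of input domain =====

-- B replaces A's repeated window re-slicing/re-comparison with per-start common-prefix lengths
-- turned into per-length repetition counts via a bucket array and suffix sums, joining a phrase
-- into its key only when it actually repeats (objective: faster).

-- ===== PORT A =====
-- innermost while: scan comparison windows, bumping the count on each match
def aLoop3 (tokens : List String) (current_phrase : List String) (key : String)
    (occ : PySem.Dict String Int) (cs ce : Int) : PySem.Dict String Int :=
  if h : ce < (tokens.length : Int) + 1 then
    let comparison_phrase := PySem.List.slice tokens (some cs) (some ce)
    let occ' :=
      if comparison_phrase = current_phrase then
        if occ.contains key then occ.modify key 0 (· + 1) else occ.insert key 2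
      else occ
    aLoop3 tokens current_phrase key occ' (cs + 1) (ce + 1)
  else occ
termination_by ((tokens.length : Int) + 1 - ce).toNat
decreasing_by simp at h ⊢; omega

-- middle while over the phrase end counter
def aLoop2 (tokens : List String) (occ : PySem.Dict String Int) (s e : Int) :
    PySem.Dict String Int :=
  if h : e < (tokens.length : Int) + 1 then
    let current_phrase := PySem.List.slice tokens (some s) (some e)
    let key := PySem.Str.join " " current_phrase
    if occ.contains key then aLoop2 tokens occ s (e + 1)
    else
      let size := e - s
      aLoop2 tokens (aLoop3 tokens current_phrase key occ e (e + size)) s (e + 1)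
  else occ
termination_by ((tokens.length : Int) + 1 - e).toNat
decreasing_by all_goals simp at h ⊢; omega

-- outer while over the phrase start counter
def aLoop1 (tokens : List String) (occ : PySem.Dict String Int) (s : Int) :
    PySem.Dict String Int :=
  if h : s < (tokens.length : Int) then
    aLoop1 tokens (aLoop2 tokens occ s (s + 1)) (s + 1)
  else occ
termination_by ((tokens.length : Int) - s).toNat
decreasing_by simp at h ⊢; omega

def count_repetitions (tokens : List String) : List (String × Int) :=
  (aLoop1 tokens PySem.Dict.empty 0).items

-- ===== PORT B =====
-- the inner while of B: common-prefix length of tokens[s:] and tokens[p:], starting from offset k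
def bCpl (tokens : List String) (s p k : Int) : Int :=
  if h : s + k < (tokens.length : Int) ∧ p + k < (tokens.length : Int) ∧
      PySem.List.pyGetD tokens (s + k) "" = PySem.List.pyGetD tokens (p + k) "" then
    bCpl tokens s p (k + 1)
  else k
termination_by ((tokens.length : Int) - (s + k)).toNat
decreasing_by simp at h ⊢; omega

def count_repetitions_alt (tokens : List String) : List (String × Int) :=
  let n : Int := tokens.length
  let occ := (PySem.List.pyRange 0 n 1).foldl (fun occ s =>
    let mtch := (PySem.List.pyRange 0 n 1).foldl (fun acc p => acc ++ [bCpl tokens s p 0]) []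
    let bucket := (PySem.List.pyRange (s + 1) n 1).foldl (fun b p =>
      let hi := min (min (PySem.List.pyGetD mtch p 0) (p - s)) (n - p)
      if 0 < hi then PySem.List.pySetD b hi (PySem.List.pyGetD b hi 0 + 1) else b)
      (List.replicate (n + 2).toNat (0 : Int))
    let cnts := (PySem.List.pyRange n 0 (-1)).foldl (fun c L =>
      PySem.List.pySetD c L (PySem.List.pyGetD c (L + 1) 0 + PySem.List.pyGetD bucket L 0))
      (List.replicate (n + 2).toNat (0 : Int))
    (PySem.List.pyRange 1 (n - s + 1) 1).foldl (fun occ L =>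
      let c := PySem.List.pyGetD cnts L 0
      if c ≠ 0 then
        let key := PySem.Str.join " " (PySem.List.slice tokens (some s) (some (s + L)))
        if occ.contains key then occ else occ.insert key (c + 1)
      else occ) occ) PySem.Dict.empty
  occ.items

-- ===== PRECONDITION & SPEC =====
def Spec_count_repetitions (tokens : List String) (out : List (String × Int)) : Prop := out = count_repetitions_alt tokens
instance (tokens : List String) (out : List (String × Int)) : Decidable (Spec_count_repetitions tokens out) := by unfold Spec_count_repetitions; infer_instance

-- ===== CLAIM (what is proved, stated in full; the proofs are below) =====
def Claim_equal_count_repetitions : Prop := ∀ (tokens : List String), Dom_count_repetitions tokens → Spec_count_repetitions tokens (count_repetitions tokens)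


-- ===== LEMMAS AND PROOFS =====

-- The step A's innermost loop performs on each matching window
def pvBump (key : String) (occ : PySem.Dict String Int) : PySem.Dict String Int :=
  if occ.contains key then occ.modify key 0 (· + 1) else occ.insert key 2

-- number of matching comparison windows A's innermost loop sees from (cs, ce)
def pvMC (tokens phrase : List String) (cs ce : Int) : Nat :=
  (List.range (((tokens.length : Int) + 1 - ce).toNat)).countP
    (fun (j : Nat) => decide (PySem.List.slice tokens (some (cs + (j : Int))) (some (ce + (j : Int))) = phrase))

-- A's middle-loop body as a fold step
def pvStepA (tokens : List String) (s : Int) (occ : PySem.Dict String Int) (e : Int) :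
    PySem.Dict String Int :=
  let current_phrase := PySem.List.slice tokens (some s) (some e)
  let key := PySem.Str.join " " current_phrase
  if occ.contains key then occ
  else aLoop3 tokens current_phrase key occ e (e + (e - s))

-- B's inner-loop body as a fold step (cnts passed in)
def pvStepB (tokens : List String) (s : Int) (cnts : List Int)
    (occ : PySem.Dict String Int) (L : Int) : PySem.Dict String Int :=
  let c := PySem.List.pyGetD cnts L 0
  if c ≠ 0 then
    let key := PySem.Str.join " " (PySem.List.slice tokens (some s) (some (s + L)))
    if occ.contains key then occ else occ.insert key (c + 1)
  else occ

theorem pvBump_insert (key : String) (occ : PySem.Dict String Int) (v : Int) :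
    pvBump key (occ.insert key v) = occ.insert key (v + 1) := by
  unfold pvBump
  rw [if_pos (PySem.Dict.contains_insert_self occ key v)]
  show (occ.insert key v).insert key ((occ.insert key v).getD key 0 + 1) = _
  rw [PySem.Dict.getD_insert_self, PySem.Dict.insert_insert_self]

theorem pvBump_iter_insert (key : String) (occ : PySem.Dict String Int) (j : Nat) (v : Int) :
    (pvBump key)^[j] (occ.insert key v) = occ.insert key (v + j) := by
  induction j generalizing v with
  | zero => simp
  | succ j ih =>
    rw [Function.iterate_succ_apply, pvBump_insert, ih]
    congr 1
    push_cast; ring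

theorem pvBump_iter_fresh (key : String) (occ : PySem.Dict String Int)
    (h : occ.contains key = false) (m : Nat) :
    (pvBump key)^[m] occ = if m = 0 then occ else occ.insert key ((m : Int) + 1) := by
  cases m with
  | zero => simp
  | succ m =>
    rw [Function.iterate_succ_apply]
    have hb : pvBump key occ = occ.insert key 2 := by unfold pvBump; rw [h]; simp
    rw [hb, pvBump_iter_insert]
    simp only [Nat.succ_ne_zero, if_false]
    congr 1
    push_cast; ring
theorem aLoop3_eq (tokens phrase : List String) (key : String) :
    ∀ (t : Nat) (cs ce : Int) (occ : PySem.Dict String Int),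
      t = ((tokens.length : Int) + 1 - ce).toNat →
      aLoop3 tokens phrase key occ cs ce = (pvBump key)^[pvMC tokens phrase cs ce] occ := by
  intro t
  induction t with
  | zero =>
    intro cs ce occ ht
    have hge : ¬ ce < (tokens.length : Int) + 1 := by omega
    rw [aLoop3, dif_neg hge]
    unfold pvMC
    rw [show (((tokens.length : Int) + 1 - ce).toNat) = 0 by omega]
    simp
  | succ t ih =>
    intro cs ce occ ht
    have hlt : ce < (tokens.length : Int) + 1 := by omega
    rw [aLoop3, dif_pos hlt]
    rw [ih (cs + 1) (ce + 1) _ (by omega)]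
    have hmc : pvMC tokens phrase cs ce =
        pvMC tokens phrase (cs + 1) (ce + 1) +
          (if PySem.List.slice tokens (some cs) (some ce) = phrase then 1 else 0) := by
      unfold pvMC
      rw [show (((tokens.length : Int) + 1 - ce).toNat) = t + 1 by omega,
          show (((tokens.length : Int) + 1 - (ce + 1)).toNat) = t by omega]
      rw [List.range_succ_eq_map, List.countP_cons, List.countP_map]
      congr 1
      · apply List.countP_congr
        intro j _
        simp only [Function.comp_apply, Nat.succ_eq_add_one]
        simp only [decide_eq_true_eq]
        rw [show cs + ((j + 1 : Nat) : Int) = cs + 1 + (j : Int) by push_cast; ring,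
            show ce + ((j + 1 : Nat) : Int) = ce + 1 + (j : Int) by push_cast; ring]
      · simp
    rw [hmc]
    by_cases hmatch : PySem.List.slice tokens (some cs) (some ce) = phrase
    · simp only [if_pos hmatch]
      rw [Function.iterate_succ_apply]
      congr 1
    · simp only [if_neg hmatch, add_zero]
theorem aLoop2_eq (tokens : List String) :
    ∀ (t : Nat) (s e : Int) (occ : PySem.Dict String Int),
      t = ((tokens.length : Int) + 1 - e).toNat →
      aLoop2 tokens occ s e =
        (PySem.List.pyRange e ((tokens.length : Int) + 1) 1).foldl (pvStepA tokens s) occ := by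
  intro t
  induction t with
  | zero =>
    intro s e occ ht
    have hge : ¬ e < (tokens.length : Int) + 1 := by omega
    rw [aLoop2, dif_neg hge, PySem.List.pyRange_one_eq_nil (by omega)]
    rfl
  | succ t ih =>
    intro s e occ ht
    have hlt : e < (tokens.length : Int) + 1 := by omega
    rw [aLoop2, dif_pos hlt, PySem.List.pyRange_one_cons hlt, List.foldl_cons]
    by_cases hc : occ.contains (PySem.Str.join " " (PySem.List.slice tokens (some s) (some e))) = true
    · rw [if_pos hc, ih s (e + 1) _ (by omega)]
      congr 1
      unfold pvStepA
      simp only [hc, if_pos]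
    · rw [if_neg hc, ih s (e + 1) _ (by omega)]
      congr 1
      unfold pvStepA
      simp only [hc]
      rfl

theorem aLoop1_eq (tokens : List String) :
    ∀ (t : Nat) (s : Int) (occ : PySem.Dict String Int),
      t = ((tokens.length : Int) - s).toNat →
      aLoop1 tokens occ s =
        (PySem.List.pyRange s (tokens.length : Int) 1).foldl
          (fun occ s => aLoop2 tokens occ s (s + 1)) occ := by
  intro t
  induction t with
  | zero =>
    intro s occ ht
    have hge : ¬ s < (tokens.length : Int) := by omega
    rw [aLoop1, dif_neg hge, PySem.List.pyRange_one_eq_nil (by omega)]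
    rfl
  | succ t ih =>
    intro s occ ht
    have hlt : s < (tokens.length : Int) := by omega
    rw [aLoop1, dif_pos hlt, PySem.List.pyRange_one_cons hlt, List.foldl_cons,
        ih (s + 1) _ (by omega)]

theorem bCpl_ge (tokens : List String) :
    ∀ (t : Nat) (s p k : Int), t = ((tokens.length : Int) - (s + k)).toNat →
    k ≤ bCpl tokens s p k := by
  intro t
  induction t with
  | zero =>
    intro s p k ht
    rw [bCpl]
    split
    · next h => omega
    · omega
  | succ t ih =>
    intro s p k ht
    rw [bCpl]
    split
    · next h => have := ih s p (k + 1) (by omega); omega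
    · omega
theorem bCpl_iff_aux (tokens : List String) (s p : Nat) :
    ∀ (d k l : Nat), d = l - k → k ≤ l → s + l ≤ tokens.length → p + l ≤ tokens.length →
    (((l : Nat) : Int) ≤ bCpl tokens (s : Int) (p : Int) (k : Int) ↔
      ∀ j, k ≤ j → j < l → tokens[s + j]? = tokens[p + j]?) := by
  intro d
  induction d with
  | zero =>
    intro k l hd hk h1 h2
    have hkl : k = l := by omega
    subst hkl
    constructor
    · intro _ j hj1 hj2; omega
    · intro _; exact bCpl_ge tokens _ _ _ _ rfl
  | succ d ih =>
    intro k l hd hk h1 h2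
    have hklt : k < l := by omega
    have hsk : s + k < tokens.length := by omega
    have hpk : p + k < tokens.length := by omega
    rw [bCpl]
    have hcast1 : ((s : Int) + (k : Int)).toNat = s + k := by omega
    have hcast2 : ((p : Int) + (k : Int)).toNat = p + k := by omega
    have hg1 : PySem.List.pyGetD tokens ((s : Int) + (k : Int)) "" = tokens[s + k] := by
      rw [PySem.List.pyGetD_eq_getElem tokens "" (by omega) (by push_cast; omega)]
      congr 1
    have hg2 : PySem.List.pyGetD tokens ((p : Int) + (k : Int)) "" = tokens[p + k] := by
      rw [PySem.List.pyGetD_eq_getElem tokens "" (by omega) (by push_cast; omega)]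
      congr 1
    by_cases heq : tokens[s + k]? = tokens[p + k]?
    · have heq' : tokens[s + k] = tokens[p + k] := by
        rw [List.getElem?_eq_getElem hsk, List.getElem?_eq_getElem hpk] at heq
        exact Option.some.inj heq
      rw [dif_pos ⟨by push_cast; omega, by push_cast; omega, by rw [hg1, hg2, heq']⟩]
      rw [show ((k : Int) + 1) = ((k + 1 : Nat) : Int) by push_cast; ring]
      rw [ih (k + 1) l (by omega) (by omega) h1 h2]
      constructor
      · intro h j hj1 hj2
        rcases Nat.eq_or_lt_of_le hj1 with rfl | hj
        · exact heq
        · exact h j hj hj2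
      · intro h j hj1 hj2; exact h j (by omega) hj2
    · rw [dif_neg]
      · constructor
        · intro h; omega
        · intro h; exact absurd (h k le_rfl hklt) heq
      · intro ⟨_, _, hcontra⟩
        rw [hg1, hg2] at hcontra
        exact heq (by rw [List.getElem?_eq_getElem hsk, List.getElem?_eq_getElem hpk, hcontra])

theorem take_drop_eq_iff (tokens : List String) (s p l : Nat)
    (h1 : s + l ≤ tokens.length) (h2 : p + l ≤ tokens.length) :
    ((tokens.drop p).take l = (tokens.drop s).take l ↔
      ∀ j, 0 ≤ j → j < l → tokens[s + j]? = tokens[p + j]?) := by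
  constructor
  · intro h j _ hj
    have := congrArg (fun xs => xs[j]?) h
    simpa [List.getElem?_take, List.getElem?_drop, hj] using this.symm
  · intro h
    apply List.ext_getElem?
    intro i
    rw [List.getElem?_take, List.getElem?_take]
    by_cases hi : i < l
    · rw [if_pos hi, if_pos hi, List.getElem?_drop, List.getElem?_drop]
      exact (h i (by omega) hi).symm
    · rw [if_neg hi, if_neg hi]

theorem bCpl_ge_iff (tokens : List String) (s p L : Int)
    (hs : 0 ≤ s) (hp : 0 ≤ p) (hL : 0 ≤ L)
    (h1 : s + L ≤ (tokens.length : Int)) (h2 : p + L ≤ (tokens.length : Int)) :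
    (L ≤ bCpl tokens s p 0 ↔
      PySem.List.slice tokens (some p) (some (p + L)) =
        PySem.List.slice tokens (some s) (some (s + L))) := by
  rw [PySem.List.slice_toNat tokens hp (by omega), PySem.List.slice_toNat tokens hs (by omega)]
  rw [show (p + L).toNat - p.toNat = L.toNat by omega, show (s + L).toNat - s.toNat = L.toNat by omega]
  rw [take_drop_eq_iff tokens s.toNat p.toNat L.toNat (by omega) (by omega)]
  rw [show s = ((s.toNat : Nat) : Int) by omega, show p = ((p.toNat : Nat) : Int) by omega,
      show L = ((L.toNat : Nat) : Int) by omega]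
  rw [show ((0 : Int)) = (((0 : Nat)) : Int) by norm_num]
  exact bCpl_iff_aux tokens s.toNat p.toNat (L.toNat - 0) 0 L.toNat (by omega) (by omega) (by omega) (by omega)

theorem pyGetD_pySetD_int (b : List Int) (i v w : Int) (hi0 : 0 ≤ i) (hilen : i < (b.length : Int)) (hv : 0 ≤ v) :
    PySem.List.pyGetD (PySem.List.pySetD b i w) v 0 = if v = i then w else PySem.List.pyGetD b v 0 := by
  rw [PySem.List.pySetD_of_nonneg b w hi0, PySem.List.pyGetD_of_nonneg _ 0 hv,
      PySem.List.pyGetD_of_nonneg b 0 hv]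
  rcases eq_or_ne v i with rfl | hne
  · rw [if_pos rfl]
    have hlt : v.toNat < b.length := by omega
    simp [List.getD, hlt]
  · rw [if_neg hne]
    have hcase : v.toNat ≠ i.toNat ∨ (v = 0 ∧ i = 0) := by omega
    rcases hcase with h | ⟨rfl, rfl⟩
    · simp [List.getD, Ne.symm h]
    · exact absurd rfl hne

theorem foldl_incr_getD (f : Int → Int) (ps : List Int) :
    ∀ (b : List Int) (v : Int), 0 ≤ v → (∀ p ∈ ps, f p < (b.length : Int)) →
    PySem.List.pyGetD (ps.foldl (fun b p =>
        if 0 < f p then PySem.List.pySetD b (f p) (PySem.List.pyGetD b (f p) 0 + 1) else b) b) v 0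
      = PySem.List.pyGetD b v 0 + ((ps.countP (fun p => decide (f p = v ∧ 0 < f p)) : Nat) : Int) := by
  induction ps with
  | nil => intro b v _ _; simp
  | cons p rest ih =>
    intro b v hv hlen
    rw [List.foldl_cons, List.countP_cons]
    by_cases hfp : 0 < f p
    · rw [if_pos hfp]
      rw [ih _ v hv (by intro x hx; rw [PySem.List.length_pySetD]; exact hlen x (List.mem_cons_of_mem p hx))]
      rw [pyGetD_pySetD_int b (f p) v _ (by omega) (hlen p (List.mem_cons_self)) hv]
      by_cases hveq : v = f p
      · subst hveq
        rw [if_pos rfl]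
        have hd : (decide (f p = f p ∧ 0 < f p)) = true := by simp [hfp]
        rw [hd, if_pos rfl]
        push_cast; ring
      · rw [if_neg hveq]
        have hd : (decide (f p = v ∧ 0 < f p)) = false := by simp; intro h; omega
        rw [hd]
        simp only [Bool.false_eq_true, if_false]
        push_cast; ring
    · rw [if_neg hfp, ih _ v hv (by intro x hx; exact hlen x (List.mem_cons_of_mem p hx))]
      have hd : (decide (f p = v ∧ 0 < f p)) = false := by simp; intro h; omega
      rw [hd]
      simp only [Bool.false_eq_true, if_false]
      push_cast; ring

theorem foldl_countdown (bk : List Int) :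
    ∀ (t : Nat) (L0 : Int) (c : List Int), t = L0.toNat → 0 ≤ L0 →
      L0 + 1 < (c.length : Int) →
      (∀ v : Int, 1 ≤ v → v ≤ L0 →
          PySem.List.pyGetD ((PySem.List.pyRange L0 0 (-1)).foldl
            (fun c L => PySem.List.pySetD c L
              (PySem.List.pyGetD c (L + 1) 0 + PySem.List.pyGetD bk L 0)) c) v 0
            = PySem.List.pyGetD c (L0 + 1) 0 +
              ((PySem.List.pyRange v (L0 + 1) 1).map (fun w => PySem.List.pyGetD bk w 0)).sum) ∧
      (∀ v : Int, L0 < v →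
          PySem.List.pyGetD ((PySem.List.pyRange L0 0 (-1)).foldl
            (fun c L => PySem.List.pySetD c L
              (PySem.List.pyGetD c (L + 1) 0 + PySem.List.pyGetD bk L 0)) c) v 0
            = PySem.List.pyGetD c v 0) := by
  intro t
  induction t with
  | zero =>
    intro L0 c ht h0 hlen
    have hL0 : L0 = 0 := by omega
    subst hL0
    rw [PySem.List.pyRange_neg_one_eq_nil (by omega)]
    constructor
    · intro v hv1 hv2; omega
    · intro v _; rfl
  | succ t ih =>
    intro L0 c ht h0 hlen
    have hpos : (0 : Int) < L0 := by omega
    rw [PySem.List.pyRange_neg_one_cons hpos, List.foldl_cons]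
    obtain ⟨ih1, ih2⟩ := ih (L0 - 1)
      (PySem.List.pySetD c L0 (PySem.List.pyGetD c (L0 + 1) 0 + PySem.List.pyGetD bk L0 0))
      (by omega) (by omega) (by rw [PySem.List.length_pySetD]; omega)
    have hupd : ∀ v : Int, 0 ≤ v →
        PySem.List.pyGetD (PySem.List.pySetD c L0
          (PySem.List.pyGetD c (L0 + 1) 0 + PySem.List.pyGetD bk L0 0)) v 0
        = if v = L0 then PySem.List.pyGetD c (L0 + 1) 0 + PySem.List.pyGetD bk L0 0
          else PySem.List.pyGetD c v 0 := by
      intro v hv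
      exact pyGetD_pySetD_int c L0 v _ (by omega) (by omega) hv
    constructor
    · intro v hv1 hv2
      rcases eq_or_lt_of_le hv2 with rfl | hvlt
      · rw [ih2 v (by omega), hupd v (by omega), if_pos rfl,
            PySem.List.pyRange_one_singleton]
        simp
      · rw [ih1 v hv1 (by omega), hupd (L0 - 1 + 1) (by omega), if_pos (by ring),
            show L0 - 1 + 1 = L0 by ring]
        rw [PySem.List.pyRange_one_succ_right (by omega : v ≤ L0), List.map_append,
            List.sum_append]
        simp
        ring
    · intro v hv
      rw [ih2 v (by omega), hupd v (by omega), if_neg (by omega)]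

theorem sum_ite_singleton (c L N : Int) (hL : 1 ≤ L) :
    ((PySem.List.pyRange L (N + 1) 1).map
        (fun w => if (decide (c = w ∧ 0 < c)) = true then (1 : Int) else 0)).sum
      = if L ≤ c ∧ c ≤ N then 1 else 0 := by
  rw [PySem.List.sum_map_ite_one_zero]
  by_cases hc : L ≤ c ∧ c ≤ N
  · rw [if_pos hc]
    rw [PySem.List.pyRange_one_append L c (N + 1) (by omega) (by omega),
        PySem.List.pyRange_one_cons (by omega : c < N + 1)]
    rw [List.countP_append, List.countP_cons]
    have h1 : (PySem.List.pyRange L c 1).countP (fun w => decide (c = w ∧ 0 < c)) = 0 := by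
      rw [List.countP_eq_zero]
      intro w hw
      rw [PySem.List.mem_pyRange_one] at hw
      simp; intro h; omega
    have h2 : (PySem.List.pyRange (c + 1) (N + 1) 1).countP (fun w => decide (c = w ∧ 0 < c)) = 0 := by
      rw [List.countP_eq_zero]
      intro w hw
      rw [PySem.List.mem_pyRange_one] at hw
      simp; intro h; omega
    rw [h1, h2]
    have h3 : (decide (c = c ∧ 0 < c)) = true := by simp; omega
    rw [h3]
    simp
  · rw [if_neg hc]
    have h1 : (PySem.List.pyRange L (N + 1) 1).countP (fun w => decide (c = w ∧ 0 < c)) = 0 := by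
      rw [List.countP_eq_zero]
      intro w hw
      rw [PySem.List.mem_pyRange_one] at hw
      simp; intro h; omega
    rw [h1]
    rfl

theorem sum_countP (ps : List Int) (f : Int → Int) (L N : Int) (h1 : 1 ≤ L)
    (hub : ∀ p ∈ ps, f p ≤ N) :
    ((PySem.List.pyRange L (N + 1) 1).map
        (fun w => ((ps.countP (fun p => decide (f p = w ∧ 0 < f p)) : Nat) : Int))).sum
      = ((ps.countP (fun p => decide (L ≤ f p)) : Nat) : Int) := by
  induction ps with
  | nil => simp
  | cons p rest ih =>
    have hub' : ∀ x ∈ rest, f x ≤ N := fun x hx => hub x (List.mem_cons_of_mem p hx)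
    simp only [List.countP_cons]
    have hsplit : ((PySem.List.pyRange L (N + 1) 1).map
        (fun w => ((rest.countP (fun q => decide (f q = w ∧ 0 < f q))
          + if (decide (f p = w ∧ 0 < f p)) = true then 1 else 0 : Nat) : Int))).sum
        = ((PySem.List.pyRange L (N + 1) 1).map
            (fun w => ((rest.countP (fun q => decide (f q = w ∧ 0 < f q)) : Nat) : Int))).sum
          + ((PySem.List.pyRange L (N + 1) 1).map
            (fun w => if (decide (f p = w ∧ 0 < f p)) = true then (1 : Int) else 0)).sum := by
      rw [← PySem.List.sum_map_add_int]
      congr 1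
      apply List.map_congr_left
      intro w _
      push_cast
      split <;> simp
    rw [hsplit, ih hub', sum_ite_singleton (f p) L N h1]
    have hfpN : f p ≤ N := hub p List.mem_cons_self
    by_cases hLf : L ≤ f p
    · rw [if_pos ⟨hLf, hfpN⟩]
      have hd : (decide (L ≤ f p)) = true := by simp [hLf]
      rw [hd, if_pos rfl]
      push_cast; ring
    · rw [if_neg (fun h => hLf h.1)]
      have hd : (decide (L ≤ f p)) = false := by simp [hLf]
      rw [hd]
      simp only [Bool.false_eq_true, if_false]
      push_cast; ring

theorem countP_range_restrict (N s L : Int) (Q : Int → Bool) (h1 : 1 ≤ L) (hsL : s + L ≤ N) :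
    (PySem.List.pyRange (s + 1) N 1).countP (fun p => decide (L ≤ p - s ∧ L ≤ N - p) && Q p)
      = (PySem.List.pyRange (s + L) (N - L + 1) 1).countP Q := by
  by_cases hne : s + L ≤ N - L + 1
  · rw [PySem.List.pyRange_one_append (s + 1) (s + L) N (by omega) (by omega),
        PySem.List.pyRange_one_append (s + L) (N - L + 1) N (by omega) (by omega),
        List.countP_append, List.countP_append]
    have hlow : (PySem.List.pyRange (s + 1) (s + L) 1).countP
        (fun p => decide (L ≤ p - s ∧ L ≤ N - p) && Q p) = 0 := by
      rw [List.countP_eq_zero]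
      intro p hp
      rw [PySem.List.mem_pyRange_one] at hp
      simp; intro h; omega
    have hhigh : (PySem.List.pyRange (N - L + 1) N 1).countP
        (fun p => decide (L ≤ p - s ∧ L ≤ N - p) && Q p) = 0 := by
      rw [List.countP_eq_zero]
      intro p hp
      rw [PySem.List.mem_pyRange_one] at hp
      simp; intro h; omega
    have hmid : (PySem.List.pyRange (s + L) (N - L + 1) 1).countP
        (fun p => decide (L ≤ p - s ∧ L ≤ N - p) && Q p)
        = (PySem.List.pyRange (s + L) (N - L + 1) 1).countP Q := by
      apply List.countP_congr
      intro p hp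
      rw [PySem.List.mem_pyRange_one] at hp
      have : (decide (L ≤ p - s ∧ L ≤ N - p)) = true := by simp; omega
      rw [this, Bool.true_and]
    omega
  · rw [PySem.List.pyRange_one_eq_nil (by omega : N - L + 1 ≤ s + L)]
    rw [List.countP_nil, List.countP_eq_zero]
    intro p hp
    rw [PySem.List.mem_pyRange_one] at hp
    simp; intro h; omega

theorem cntP_eq_pvMC (tokens : List String) (s L : Int) (mtch : List Int)
    (hm : mtch = (PySem.List.pyRange 0 (tokens.length : Int) 1).map (fun p => bCpl tokens s p 0))
    (h0 : 0 ≤ s) (h1 : 1 ≤ L) (h2 : s + L ≤ (tokens.length : Int)) :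
    (PySem.List.pyRange (s + L) ((tokens.length : Int) - L + 1) 1).countP
        (fun p => decide (L ≤ PySem.List.pyGetD mtch p 0))
      = pvMC tokens (PySem.List.slice tokens (some s) (some (s + L))) (s + L) (s + L + L) := by
  rw [PySem.List.pyRange_one (s + L) ((tokens.length : Int) - L + 1), List.countP_map]
  unfold pvMC
  rw [show (((tokens.length : Int) + 1 - (s + L + L)).toNat)
        = (((tokens.length : Int) - L + 1 - (s + L)).toNat) by omega]
  apply List.countP_congr
  intro j hj
  rw [List.mem_range] at hj
  have hjN : s + L + (j : Int) < (tokens.length : Int) := by omega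
  simp only [Function.comp_apply]
  rw [hm, PySem.List.pyGetD_map_pyRange_of_nonneg (fun p => bCpl tokens s p 0)
        (tokens.length : Int) (s + L + (j : Int)) 0 (by omega) hjN]
  simp only [decide_eq_true_eq]
  rw [bCpl_ge_iff tokens s (s + L + (j : Int)) L h0 (by omega) (by omega) h2 (by omega)]
  rw [show s + L + (j : Int) + L = s + L + L + (j : Int) by ring,
      show (s + L) + (j : Int) = s + L + (j : Int) by ring]

-- proof-side names for B's bucket / suffix-sum structures (definitionally the port's lambdas)
def pvHi (tokens : List String) (s : Int) (mtch : List Int) (p : Int) : Int :=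
  min (min (PySem.List.pyGetD mtch p 0) (p - s)) ((tokens.length : Int) - p)

def pvBucket (tokens : List String) (s : Int) (mtch : List Int) : List Int :=
  (PySem.List.pyRange (s + 1) (tokens.length : Int) 1).foldl (fun b p =>
    if 0 < pvHi tokens s mtch p then
      PySem.List.pySetD b (pvHi tokens s mtch p)
        (PySem.List.pyGetD b (pvHi tokens s mtch p) 0 + 1)
    else b)
    (List.replicate ((tokens.length : Int) + 2).toNat (0 : Int))

def pvCnts (tokens : List String) (s : Int) (mtch : List Int) : List Int :=
  (PySem.List.pyRange (tokens.length : Int) 0 (-1)).foldl (fun c L =>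
    PySem.List.pySetD c L
      (PySem.List.pyGetD c (L + 1) 0 + PySem.List.pyGetD (pvBucket tokens s mtch) L 0))
    (List.replicate ((tokens.length : Int) + 2).toNat (0 : Int))

theorem cnts_getD_eq (tokens : List String) (s L : Int) (mtch : List Int)
    (hm : mtch = (PySem.List.pyRange 0 (tokens.length : Int) 1).map (fun p => bCpl tokens s p 0))
    (h0 : 0 ≤ s) (h1 : 1 ≤ L) (h2 : s + L ≤ (tokens.length : Int)) :
    PySem.List.pyGetD (pvCnts tokens s mtch) L 0
      = ((pvMC tokens (PySem.List.slice tokens (some s) (some (s + L))) (s + L) (s + L + L) : Nat) : Int) := by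
  have hNn : (0 : Int) ≤ (tokens.length : Int) := by positivity
  have hrep : ((List.replicate ((tokens.length : Int) + 2).toNat (0 : Int)).length : Int)
      = (tokens.length : Int) + 2 := by
    rw [List.length_replicate]; omega
  have hgetrep : ∀ v : Int, 0 ≤ v →
      PySem.List.pyGetD (List.replicate ((tokens.length : Int) + 2).toNat (0 : Int)) v 0 = 0 := by
    intro v hv
    rw [PySem.List.pyGetD_of_nonneg _ 0 hv]
    rcases Nat.lt_or_ge v.toNat (((tokens.length : Int) + 2).toNat) with h | h
    · simp [List.getD, List.getElem?_replicate, h]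
    · rw [List.getD_eq_getElem?_getD, List.getElem?_eq_none (by simpa using h)]
      rfl
  have hflen : ∀ p ∈ PySem.List.pyRange (s + 1) (tokens.length : Int) 1,
      pvHi tokens s mtch p < ((List.replicate ((tokens.length : Int) + 2).toNat (0 : Int)).length : Int) := by
    intro p hp
    rw [PySem.List.mem_pyRange_one] at hp
    rw [hrep]
    unfold pvHi
    omega
  have hbucket : ∀ w : Int, 0 ≤ w →
      PySem.List.pyGetD (pvBucket tokens s mtch) w 0
      = (((PySem.List.pyRange (s + 1) (tokens.length : Int) 1).countP (fun p =>
          decide (pvHi tokens s mtch p = w ∧ 0 < pvHi tokens s mtch p)) : Nat) : Int) := by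
    intro w hw
    unfold pvBucket
    rw [foldl_incr_getD (pvHi tokens s mtch)
        (PySem.List.pyRange (s + 1) (tokens.length : Int) 1) _ w hw hflen]
    rw [hgetrep w hw, zero_add]
  have hL : L ≤ (tokens.length : Int) := by omega
  obtain ⟨hc1, _⟩ := foldl_countdown (pvBucket tokens s mtch)
    (tokens.length : Int).toNat (tokens.length : Int)
    (List.replicate ((tokens.length : Int) + 2).toNat (0 : Int)) rfl hNn (by rw [hrep]; omega)
  unfold pvCnts
  rw [hc1 L h1 hL, hgetrep _ (by omega), zero_add]
  have hmapc : ((PySem.List.pyRange L ((tokens.length : Int) + 1) 1).map (fun w =>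
      PySem.List.pyGetD (pvBucket tokens s mtch) w 0)).sum
      = ((PySem.List.pyRange L ((tokens.length : Int) + 1) 1).map (fun w =>
          (((PySem.List.pyRange (s + 1) (tokens.length : Int) 1).countP (fun p =>
            decide (pvHi tokens s mtch p = w ∧ 0 < pvHi tokens s mtch p)) : Nat) : Int))).sum := by
    apply congrArg
    apply List.map_congr_left
    intro w hw
    rw [PySem.List.mem_pyRange_one] at hw
    exact hbucket w (by omega)
  rw [hmapc]
  rw [sum_countP (PySem.List.pyRange (s + 1) (tokens.length : Int) 1)
      (pvHi tokens s mtch) L (tokens.length : Int) h1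
      (by intro p hp; rw [PySem.List.mem_pyRange_one] at hp; unfold pvHi; omega)]
  have hsplit : (PySem.List.pyRange (s + 1) (tokens.length : Int) 1).countP (fun p =>
      decide (L ≤ pvHi tokens s mtch p))
      = (PySem.List.pyRange (s + 1) (tokens.length : Int) 1).countP (fun p =>
          decide (L ≤ p - s ∧ L ≤ (tokens.length : Int) - p)
            && decide (L ≤ PySem.List.pyGetD mtch p 0)) := by
    apply List.countP_congr
    intro p _
    unfold pvHi
    simp only [le_min_iff]
    cases hA : decide (L ≤ PySem.List.pyGetD mtch p 0) <;>
      cases hB : decide (L ≤ p - s) <;>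
      cases hC : decide (L ≤ (tokens.length : Int) - p) <;> simp_all
  rw [hsplit, countP_range_restrict (tokens.length : Int) s L _ h1 h2,
      cntP_eq_pvMC tokens s L mtch hm h0 h1 h2]

theorem step_eq (tokens : List String) (s L : Int) (cnts : List Int)
    (hcnt : PySem.List.pyGetD cnts L 0 =
      ((pvMC tokens (PySem.List.slice tokens (some s) (some (s + L))) (s + L) (s + L + L) : Nat) : Int))
    (occ : PySem.Dict String Int) :
    pvStepA tokens s occ (s + L) = pvStepB tokens s cnts occ L := by
  unfold pvStepA pvStepB
  have hA : aLoop3 tokens (PySem.List.slice tokens (some s) (some (s + L)))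
      (PySem.Str.join " " (PySem.List.slice tokens (some s) (some (s + L)))) occ
      (s + L) ((s + L) + ((s + L) - s))
      = (pvBump (PySem.Str.join " " (PySem.List.slice tokens (some s) (some (s + L)))))^[
          pvMC tokens (PySem.List.slice tokens (some s) (some (s + L))) (s + L) (s + L + L)] occ := by
    rw [show (s + L) + ((s + L) - s) = s + L + L by ring]
    exact aLoop3_eq tokens _ _ (((tokens.length : Int) + 1 - (s + L + L)).toNat) (s + L) (s + L + L) occ rfl
  dsimp only
  rw [hcnt]
  by_cases hm0 : pvMC tokens (PySem.List.slice tokens (some s) (some (s + L))) (s + L) (s + L + L) = 0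
  · rw [if_neg (show ¬(((pvMC tokens (PySem.List.slice tokens (some s) (some (s + L)))
        (s + L) (s + L + L) : Nat) : Int) ≠ 0) by rw [hm0]; norm_num)]
    split
    · rfl
    · rw [hA, hm0, Function.iterate_zero_apply]
  · rw [if_pos (show (((pvMC tokens (PySem.List.slice tokens (some s) (some (s + L)))
        (s + L) (s + L + L) : Nat) : Int) ≠ 0) by exact_mod_cast hm0)]
    by_cases hc : occ.contains (PySem.Str.join " " (PySem.List.slice tokens (some s) (some (s + L)))) = true
    · rw [if_pos hc, if_pos hc]
    · simp only [Bool.not_eq_true] at hc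
      rw [hc]
      simp only [Bool.false_eq_true, if_false]
      rw [hA, pvBump_iter_fresh _ _ hc, if_neg hm0]

theorem main_dict_eq (tokens : List String) :
    aLoop1 tokens PySem.Dict.empty 0 =
      (PySem.List.pyRange 0 (tokens.length : Int) 1).foldl (fun occ s =>
        let mtch := (PySem.List.pyRange 0 (tokens.length : Int) 1).foldl
          (fun acc p => acc ++ [bCpl tokens s p 0]) []
        let bucket := (PySem.List.pyRange (s + 1) (tokens.length : Int) 1).foldl (fun b p =>
          let hi := min (min (PySem.List.pyGetD mtch p 0) (p - s)) ((tokens.length : Int) - p)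
          if 0 < hi then PySem.List.pySetD b hi (PySem.List.pyGetD b hi 0 + 1) else b)
          (List.replicate ((tokens.length : Int) + 2).toNat (0 : Int))
        let cnts := (PySem.List.pyRange (tokens.length : Int) 0 (-1)).foldl (fun c L =>
          PySem.List.pySetD c L (PySem.List.pyGetD c (L + 1) 0 + PySem.List.pyGetD bucket L 0))
          (List.replicate ((tokens.length : Int) + 2).toNat (0 : Int))
        (PySem.List.pyRange 1 ((tokens.length : Int) - s + 1) 1).foldl
          (pvStepB tokens s cnts) occ) PySem.Dict.empty := by
  rw [aLoop1_eq tokens (((tokens.length : Int) - 0).toNat) 0 PySem.Dict.empty rfl]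
  apply PySem.List.foldl_congr_mem
  intro occ s hs
  rw [PySem.List.mem_pyRange_one] at hs
  show aLoop2 tokens occ s (s + 1) =
    (PySem.List.pyRange 1 ((tokens.length : Int) - s + 1) 1).foldl
      (pvStepB tokens s
        (pvCnts tokens s ((PySem.List.pyRange 0 (tokens.length : Int) 1).foldl
          (fun acc p => acc ++ [bCpl tokens s p 0]) []))) occ
  rw [PySem.List.foldl_append_singleton_eq_map, List.nil_append]
  rw [aLoop2_eq tokens (((tokens.length : Int) + 1 - (s + 1)).toNat) s (s + 1) occ rfl]
  rw [PySem.List.pyRange_one (s + 1) ((tokens.length : Int) + 1),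
      PySem.List.pyRange_one 1 ((tokens.length : Int) - s + 1),
      List.foldl_map, List.foldl_map]
  rw [show (((tokens.length : Int) + 1 - (s + 1)).toNat) = (((tokens.length : Int) - s + 1 - 1).toNat) by omega]
  apply PySem.List.foldl_congr_mem
  intro occ' k hk
  rw [List.mem_range] at hk
  rw [show s + 1 + (k : Int) = s + (1 + (k : Int)) by ring]
  exact step_eq tokens s (1 + (k : Int)) _
    (cnts_getD_eq tokens s (1 + (k : Int)) _ rfl (by omega) (by omega) (by omega)) occ'

-- ===== VERDICT (by name: the statement is the Claim_ definition above) =====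
theorem count_repetitions_spec : Claim_equal_count_repetitions := by
  intro tokens _
  unfold Spec_count_repetitions count_repetitions count_repetitions_alt
  rw [main_dict_eq]
  rfl
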